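-- pv_equiv track=rewrite | github.com/asilbek-ismoilov/Niklar | data/nik.py | nick_generator
-- ===== SOURCE A (Python) =====
-- text = "qwertyuiopasdfghjklzxcvbnm"
--
-- fonts = [
--          "ⓠⓦⓔⓡⓣⓨⓤⓘⓞⓟⓐⓢⓓⓕⓖⓗⓙⓚⓛⓩⓧⓒⓥⓑⓝⓜ",
--          "𝓺𝔀𝓮𝓻𝓽𝔂𝓾𝓲𝓸𝓹𝓪𝓼𝓭𝓯𝓰𝓱𝓳𝓴𝓵𝔃𝔁𝓬𝓿𝓫𝓷𝓶",
--          "🅠🅦🅔🅡🅣🅨🅤🅘🅞🅟🅐🅢🅓🅕🅖🅗🅙🅚🅛🅩🅧🅒🅥🅑🅝🅜",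
--          "𝖖𝖜𝖊𝖗𝖙𝖞𝖚𝖎𝖔𝖕𝖆𝖘𝖉𝖋𝖌𝖍𝖏𝖐𝖑𝖟𝖝𝖈𝖛𝖇𝖓𝖒",
--          "𝚚𝚠𝚎𝚛𝚝𝚢𝚞𝚒𝚘𝚙𝚊𝚜𝚍𝚏𝚐𝚑𝚓𝚔𝚕𝚣𝚡𝚌𝚟𝚋𝚗𝚖",
--          "ｑｗｅｒｔｙｕｉｏｐａｓｄｆｇｈｊｋｌｚｘｃｖｂｎｍ",
--          "⒬⒲⒠⒭⒯⒴⒰⒤⒪⒫⒜⒮⒟⒡⒢⒣⒥⒦⒧⒵⒳⒞⒱⒝⒩⒨",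
--          "𝕢𝕨𝕖𝕣𝕥𝕪𝕦𝕚𝕠𝕡𝕒𝕤𝕕𝕗𝕘𝕙𝕛𝕜𝕝𝕫𝕩𝕔𝕧𝕓𝕟𝕞",
--          "🅀🅆🄴🅁🅃🅈🅄🄸🄾🄿🄰🅂🄳🄵🄶🄷🄹🄺🄻🅉🅇🄲🅅🄱🄽🄼",
--          "𝓆𝓌𝑒𝓇𝓉𝓎𝓊𝒾𝑜𝓅𝒶𝓈𝒹𝒻𝑔𝒽𝒿𝓀𝓁𝓏𝓍𝒸𝓋𝒷𝓃𝓂",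
--          "𝙦𝙬𝙚𝙧𝙩𝙮𝙪𝙞𝙤𝙥𝙖𝙨𝙙𝙛𝙜𝙝𝙟𝙠𝙡𝙯𝙭𝙘𝙫𝙗𝙣𝙢",
--          "𝒒𝒘𝒆𝒓𝒕𝒚𝒖𝒊𝒐𝒑𝒂𝒔𝒅𝒇𝒈𝒉𝒋𝒌𝒍𝒛𝒙𝒄𝒗𝒃𝒏𝒎",
--          "qẃéŕtӳúíőṕáśdfǵhjḱĺźxćvbńḿ",
--          "QWERTYUIOPASDFGHJKLZXCVBNM"
--         ]
--
-- def nick_generator(name):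
--     result = []
--     for font in fonts:
--         my_name = name
--         for i in range (len (text)):
--             my_name = my_name.replace(text[i], font[i])
--         result.append(my_name)
--     return result
-- ===== SOURCE B (Python) =====
-- text = "qwertyuiopasdfghjklzxcvbnm"
--
-- fonts = [
--          "ⓠⓦⓔⓡⓣⓨⓤⓘⓞⓟⓐⓢⓓⓕⓖⓗⓙⓚⓛⓩⓧⓒⓥⓑⓝⓜ",
--          "𝓺𝔀𝓮𝓻𝓽𝔂𝓾𝓲𝓸𝓹𝓪𝓼𝓭𝓯𝓰𝓱𝓳𝓴𝓵𝔃𝔁𝓬𝓿𝓫𝓷𝓶",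
--          "🅠🅦🅔🅡🅣🅨🅤🅘🅞🅟🅐🅢🅓🅕🅖🅗🅙🅚🅛🅩🅧🅒🅥🅑🅝🅜",
--          "𝖖𝖜𝖊𝖗𝖙𝖞𝖚𝖎𝖔𝖕𝖆𝖘𝖉𝖋𝖌𝖍𝖏𝖐𝖑𝖟𝖝𝖈𝖛𝖇𝖓𝖒",
--          "𝚚𝚠𝚎𝚛𝚝𝚢𝚞𝚒𝚘𝚙𝚊𝚜𝚍𝚏𝚐𝚑𝚓𝚔𝚕𝚣𝚡𝚌𝚟𝚋𝚗𝚖",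
--          "ｑｗｅｒｔｙｕｉｏｐａｓｄｆｇｈｊｋｌｚｘｃｖｂｎｍ",
--          "⒬⒲⒠⒭⒯⒴⒰⒤⒪⒫⒜⒮⒟⒡⒢⒣⒥⒦⒧⒵⒳⒞⒱⒝⒩⒨",
--          "𝕢𝕨𝕖𝕣𝕥𝕪𝕦𝕚𝕠𝕡𝕒𝕤𝕕𝕗𝕘𝕙𝕛𝕜𝕝𝕫𝕩𝕔𝕧𝕓𝕟𝕞",
--          "🅀🅆🄴🅁🅃🅈🅄🄸🄾🄿🄰🅂🄳🄵🄶🄷🄹🄺🄻🅉🅇🄲🅅🄱🄽🄼",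
--          "𝓆𝓌𝑒𝓇𝓉𝓎𝓊𝒾𝑜𝓅𝒶𝓈𝒹𝒻𝑔𝒽𝒿𝓀𝓁𝓏𝓍𝒸𝓋𝒷𝓃𝓂",
--          "𝙦𝙬𝙚𝙧𝙩𝙮𝙪𝙞𝙤𝙥𝙖𝙨𝙙𝙛𝙜𝙝𝙟𝙠𝙡𝙯𝙭𝙘𝙫𝙗𝙣𝙢",
--          "𝒒𝒘𝒆𝒓𝒕𝒚𝒖𝒊𝒐𝒑𝒂𝒔𝒅𝒇𝒈𝒉𝒋𝒌𝒍𝒛𝒙𝒄𝒗𝒃𝒏𝒎",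
--          "qẃéŕtӳúíőṕáśdfǵhjḱĺźxćvbńḿ",
--          "QWERTYUIOPASDFGHJKLZXCVBNM"
--         ]
--
-- def nick_generator(name):
--     parts = [[] for _ in fonts]
--     for ch in name:
--         idx = text.find(ch)
--         for p, font in zip(parts, fonts):
--             p.append(ch if idx == -1 else font[idx])
--     return [''.join(p) for p in parts]
-- ===== Notes on version B (the rewrite author's own statement) =====
-- stated objective: alternative
-- what changed: Transposed the loops: instead of 14 passes over the name with one .replace per text letter per font (14*26 whole-string scans), B makes a single pass over the characters of name, looks each character up in text once, and appends the corresponding glyph (or the character itself) to all 14 per-font accumulators, joining them at the end.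
import Mathlib
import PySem

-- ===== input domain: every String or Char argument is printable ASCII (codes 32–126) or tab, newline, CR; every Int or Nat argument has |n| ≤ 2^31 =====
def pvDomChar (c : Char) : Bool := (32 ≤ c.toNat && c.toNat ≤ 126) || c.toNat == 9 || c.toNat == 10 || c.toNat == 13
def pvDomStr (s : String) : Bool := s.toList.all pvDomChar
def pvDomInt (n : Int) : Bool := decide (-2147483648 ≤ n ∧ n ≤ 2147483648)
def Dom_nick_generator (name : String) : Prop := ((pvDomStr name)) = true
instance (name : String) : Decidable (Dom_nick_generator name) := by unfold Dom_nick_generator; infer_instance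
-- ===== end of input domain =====

-- B transposes A's loops: one pass over the characters of name, each looked up in text once,
-- extending all 14 font results simultaneously (objective: alternative decomposition, not faster).

def pvText : String := "qwertyuiopasdfghjklzxcvbnm"

def pvFonts : List String :=
  [ "ⓠⓦⓔⓡⓣⓨⓤⓘⓞⓟⓐⓢⓓⓕⓖⓗⓙⓚⓛⓩⓧⓒⓥⓑⓝⓜ",
    "𝓺𝔀𝓮𝓻𝓽𝔂𝓾𝓲𝓸𝓹𝓪𝓼𝓭𝓯𝓰𝓱𝓳𝓴𝓵𝔃𝔁𝓬𝓿𝓫𝓷𝓶",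
    "🅠🅦🅔🅡🅣🅨🅤🅘🅞🅟🅐🅢🅓🅕🅖🅗🅙🅚🅛🅩🅧🅒🅥🅑🅝🅜",
    "𝖖𝖜𝖊𝖗𝖙𝖞𝖚𝖎𝖔𝖕𝖆𝖘𝖉𝖋𝖌𝖍𝖏𝖐𝖑𝖟𝖝𝖈𝖛𝖇𝖓𝖒",
    "𝚚𝚠𝚎𝚛𝚝𝚢𝚞𝚒𝚘𝚙𝚊𝚜𝚍𝚏𝚐𝚑𝚓𝚔𝚕𝚣𝚡𝚌𝚟𝚋𝚗𝚖",
    "ｑｗｅｒｔｙｕｉｏｐａｓｄｆｇｈｊｋｌｚｘｃｖｂｎｍ",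
    "⒬⒲⒠⒭⒯⒴⒰⒤⒪⒫⒜⒮⒟⒡⒢⒣⒥⒦⒧⒵⒳⒞⒱⒝⒩⒨",
    "𝕢𝕨𝕖𝕣𝕥𝕪𝕦𝕚𝕠𝕡𝕒𝕤𝕕𝕗𝕘𝕙𝕛𝕜𝕝𝕫𝕩𝕔𝕧𝕓𝕟𝕞",
    "🅀🅆🄴🅁🅃🅈🅄🄸🄾🄿🄰🅂🄳🄵🄶🄷🄹🄺🄻🅉🅇🄲🅅🄱🄽🄼",
    "𝓆𝓌𝑒𝓇𝓉𝓎𝓊𝒾𝑜𝓅𝒶𝓈𝒹𝒻𝑔𝒽𝒿𝓀𝓁𝓏𝓍𝒸𝓋𝒷𝓃𝓂",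
    "𝙦𝙬𝙚𝙧𝙩𝙮𝙪𝙞𝙤𝙥𝙖𝙨𝙙𝙛𝙜𝙝𝙟𝙠𝙡𝙯𝙭𝙘𝙫𝙗𝙣𝙢",
    "𝒒𝒘𝒆𝒓𝒕𝒚𝒖𝒊𝒐𝒑𝒂𝒔𝒅𝒇𝒈𝒉𝒋𝒌𝒍𝒛𝒙𝒄𝒗𝒃𝒏𝒎",
    "qẃéŕtӳúíőṕáśdfǵhjḱĺźxćvbńḿ",
    "QWERTYUIOPASDFGHJKLZXCVBNM" ]

-- ===== PORT A =====
-- inner loop of A: for i in range(len(text)): my_name = my_name.replace(text[i], font[i])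
def pvInnerA (font : String) (name : String) : String :=
  (PySem.List.pyRange 0 (PySem.Str.len pvText) 1).foldl
    (fun my_name i =>
      match PySem.Str.pyGet? pvText i, PySem.Str.pyGet? font i with
      | some a, some b => PySem.Str.replace my_name (String.ofList [a]) (String.ofList [b])
      | _, _ => my_name)
    name

def nick_generator (name : String) : List String :=
  pvFonts.foldl (fun result font => result ++ [pvInnerA font name]) []

-- ===== PORT B =====
def nick_generator_alt (name : String) : List String :=
  (name.toList.foldl
    (fun parts ch =>
      let idx := PySem.Str.find pvText (String.ofList [ch])
      (parts.zip pvFonts).map (fun pf =>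
        pf.1 ++ [if idx = -1 then ch
                 else match PySem.Str.pyGet? pf.2 idx with
                      | some c => c
                      | none => ch]))  -- none is unreachable: find's result indexes every 26-char font
    (pvFonts.map (fun _ => ([] : List Char)))).map String.ofList

-- ===== PRECONDITION & SPEC =====
def Spec_nick_generator (name : String) (out : List String) : Prop := out = nick_generator_alt name
instance (name : String) (out : List String) : Decidable (Spec_nick_generator name out) := by unfold Spec_nick_generator; infer_instance

-- ===== CLAIM (what is proved, stated in full; the proofs are below) =====
def Claim_equal_nick_generator : Prop := ∀ (name : String), Dom_nick_generator name → Spec_nick_generator name (nick_generator name)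

-- ===== LEMMAS AND PROOFS =====

-- the per-character function B applies for a given font (as a char list F)
def pvG (F : List Char) (x : Char) : Char :=
  if PySem.Chars.find pvText.toList [x] = -1 then x
  else match F[(PySem.Chars.find pvText.toList [x]).toNat]? with
       | some c => c
       | none => x

-- B's fold step with the let inlined
def pvBstep (parts : List (List Char)) (ch : Char) : List (List Char) :=
  (parts.zip pvFonts).map (fun pf =>
    pf.1 ++ [if PySem.Str.find pvText (String.ofList [ch]) = -1 then ch
             else match PySem.Str.pyGet? pf.2 (PySem.Str.find pvText (String.ofList [ch])) with
                  | some c => c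
                  | none => ch])

-- single-character replace is a character map
theorem pvReplaceGo (a b : Char) :
    ∀ (fuel : Nat) (l acc : List Char), l.length ≤ fuel →
      PySem.Chars.replace.go [a] [b] fuel l acc
        = acc.reverse ++ l.map (fun x => if x = a then b else x) := by
  intro fuel
  induction fuel with
  | zero =>
    intro l acc h
    have : l = [] := List.eq_nil_of_length_eq_zero (Nat.le_zero.mp h)
    subst this; simp [PySem.Chars.replace.go]
  | succ n ih =>
    intro l acc h
    cases l with
    | nil => simp [PySem.Chars.replace.go]
    | cons c t =>
      simp only [PySem.Chars.replace.go]
      by_cases hc : c = a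
      · subst hc
        have hpre : List.isPrefixOf [c] (c :: t) = true := by
          simp [List.isPrefixOf]
        rw [if_pos hpre]
        rw [ih _ _ (by simpa using Nat.le_of_succ_le_succ h)]
        simp
      · have hpre : List.isPrefixOf [a] (c :: t) = false := by
          simp [List.isPrefixOf]; exact fun h' => absurd h'.symm hc
        rw [if_neg (by simp [hpre])]
        rw [ih _ _ (by simpa using Nat.le_of_succ_le_succ h)]
        simp [hc]

theorem pvReplaceChar (s : List Char) (a b : Char) :
    PySem.Chars.replace s [a] [b] = s.map (fun x => if x = a then b else x) := by
  rw [PySem.Chars.replace]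
  simp only [List.isEmpty_cons, Bool.false_eq_true, if_false]
  exact pvReplaceGo a b s.length s [] le_rfl

theorem pvReplaceCharStr (s : String) (a b : Char) :
    (PySem.Str.replace s (String.ofList [a]) (String.ofList [b])).toList
      = s.toList.map (fun x => if x = a then b else x) := by
  rw [PySem.Str.replace]
  simp [String.toList_ofList, pvReplaceChar]

-- a singleton list is a prefix iff it is the head
theorem pvSingletonPrefix (c : Char) (l : List Char) : [c] <+: l ↔ l.head? = some c := by
  cases l with
  | nil => simp
  | cons x t => simp [List.cons_prefix_cons, eq_comm]

-- find with a singleton pattern fails iff the char is absent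
theorem pvFindMem (T : List Char) (x : Char) :
    PySem.Chars.find T [x] = -1 ↔ x ∉ T := by
  rw [PySem.Chars.find_eq_neg_one_iff, List.singleton_infix_iff]

-- chain that never matches leaves x unchanged
theorem pvChainId (x : Char) :
    ∀ (ps : List (Char × Char)), (∀ p ∈ ps, x ≠ p.1) →
      ps.foldl (fun y p => if y = p.1 then p.2 else y) x = x := by
  intro ps
  induction ps with
  | nil => simp
  | cons p rest ih =>
    intro h
    simp only [List.foldl_cons, if_neg (h p (by simp))]
    exact ih (fun q hq => h q (by simp [hq]))

-- chain = first-match lookup, given later patterns never hit earlier images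
theorem pvChainFind (x : Char) :
    ∀ (ps : List (Char × Char)), ps.Pairwise (fun p q => p.2 ≠ q.1) →
      ps.foldl (fun y p => if y = p.1 then p.2 else y) x
        = (match ps.find? (fun p => p.1 == x) with
           | some p => p.2
           | none => x) := by
  intro ps
  induction ps with
  | nil => simp
  | cons p rest ih =>
    intro hp
    rcases List.pairwise_cons.mp hp with ⟨hhead, htail⟩
    by_cases hx : x = p.1
    · subst hx
      simp only [List.foldl_cons, List.find?_cons, beq_self_eq_true]
      exact pvChainId p.2 rest (fun q hq => hhead q hq)
    · simp only [List.foldl_cons, if_neg hx, List.find?_cons]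
      rw [show (p.1 == x) = false by simp [Ne.symm hx]]
      exact ih htail

-- find? on the zip picks F at the first index where T carries x
theorem pvFindZip (x : Char) :
    ∀ (T F : List Char) (k : Nat) (hk : k < T.length) (hF : F.length = T.length),
      T[k] = x → (∀ i (h : i < k), T[i]'(by omega) ≠ x) →
      (T.zip F).find? (fun p => p.1 == x) = some (x, F[k]'(hF ▸ hk)) := by
  intro T
  induction T with
  | nil => intro F k hk; simp at hk
  | cons t T ih =>
    intro F k hk hF hx hmin
    cases F with
    | nil => simp at hF
    | cons f F =>
      cases k with
      | zero =>
        simp at hx; subst hx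
        simp
      | succ k =>
        have hne : t ≠ x := by
          have := hmin 0 (Nat.succ_pos k); simpa using this
        simp only [List.zip_cons_cons, List.find?_cons]
        rw [show (t == x) = false by simp [hne]]
        exact ih F k (by simpa using hk) (by simpa using hF) (by simpa using hx)
          (fun i h => by have := hmin (i+1) (by omega); simpa using this)

-- the first-match lookup over the zip equals pvG's find-based lookup
theorem pvFindG (T F : List Char) (hF : F.length = T.length) (x : Char) :
    (match (T.zip F).find? (fun p => p.1 == x) with
     | some p => p.2
     | none => x)
      = (if PySem.Chars.find T [x] = -1 then x
         else match F[(PySem.Chars.find T [x]).toNat]? with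
              | some c => c
              | none => x) := by
  by_cases h : PySem.Chars.find T [x] = -1
  · have hmem : x ∉ T := (pvFindMem T x).mp h
    have hnone : (T.zip F).find? (fun p => p.1 == x) = none := by
      rw [List.find?_eq_none]
      intro p hp
      have : p.1 ∈ T := (List.of_mem_zip hp).1
      simp only [beq_iff_eq]
      intro he; exact hmem (he ▸ this)
    rw [hnone, if_pos h]
  · have h0 : 0 ≤ PySem.Chars.find T [x] := by
      have := PySem.Chars.neg_one_le_find T [x]; omega
    obtain ⟨hpre, hmin⟩ := PySem.Chars.find_spec h0
    set k := (PySem.Chars.find T [x]).toNat with hkdef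
    have hgetk : T[k]? = some x := by
      rw [← List.head?_drop]; exact (pvSingletonPrefix x _).mp hpre
    have hk : k < T.length := by
      by_contra hge
      rw [List.getElem?_eq_none (by omega)] at hgetk; simp at hgetk
    have hxk : T[k] = x := by
      have := List.getElem?_eq_getElem hk ▸ hgetk; simpa using this
    have hminel : ∀ i (h : i < k), T[i]'(by omega) ≠ x := by
      intro i hi he
      exact hmin i hi ((pvSingletonPrefix x _).mpr (by rw [List.head?_drop, List.getElem?_eq_getElem (by omega)]; simpa using he))
    rw [pvFindZip x T F k hk hF hxk hminel, if_neg h,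
        List.getElem?_eq_getElem (by omega : k < F.length)]

-- fold of string replaces over pairs = map of the pointwise chain
theorem pvZipRepl :
    ∀ (ps : List (Char × Char)) (s : String),
      ps.foldl (fun my p => PySem.Str.replace my (String.ofList [p.1]) (String.ofList [p.2])) s
        = String.ofList (s.toList.map
            (fun x => ps.foldl (fun y p => if y = p.1 then p.2 else y) x)) := by
  intro ps
  induction ps with
  | nil => intro s; simp [String.ofList_toList]
  | cons p rest ih =>
    intro s
    simp only [List.foldl_cons]
    rw [ih]
    have : (PySem.Str.replace s (String.ofList [p.1]) (String.ofList [p.2])).toList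
        = s.toList.map (fun x => if x = p.1 then p.2 else x) := pvReplaceCharStr s p.1 p.2
    rw [this, List.map_map]
    rfl

-- the 14 fonts all have 26 chars and satisfy the stability condition:
-- an image character is never a pattern character replaced later
set_option maxRecDepth 40000 in
theorem pvFontsFacts :
    ∀ f ∈ pvFonts, f.toList.length = pvText.toList.length ∧
      (pvText.toList.zip f.toList).Pairwise (fun p q => p.2 ≠ q.1) := by
  decide

-- A's inner loop, lowered to the fold over the zipped pattern/image pairs
theorem pvInnerRange (font : String) (h26 : font.toList.length = pvText.toList.length) :
    ∀ (m k : Nat), k + m = 26 → ∀ (s : String),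
      ((List.range' k m).map (fun n : Nat => (n : Int))).foldl
        (fun my i =>
          match PySem.Str.pyGet? pvText i, PySem.Str.pyGet? font i with
          | some a, some b => PySem.Str.replace my (String.ofList [a]) (String.ofList [b])
          | _, _ => my) s
        = ((pvText.toList.drop k).zip (font.toList.drop k)).foldl
            (fun my p => PySem.Str.replace my (String.ofList [p.1]) (String.ofList [p.2])) s := by
  have hT : pvText.toList.length = 26 := by decide
  intro m
  induction m with
  | zero =>
    intro k hk s
    rw [List.drop_eq_nil_of_le (by omega)]
    simp
  | succ m ih =>
    intro k hk s
    have hkT : k < pvText.toList.length := by omega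
    have hkF : k < font.toList.length := by omega
    rw [List.range'_succ, List.map_cons, List.foldl_cons,
        PySem.Str.pyGet?_natCast, PySem.Str.pyGet?_natCast,
        List.getElem?_eq_getElem hkT, List.getElem?_eq_getElem hkF,
        List.drop_eq_getElem_cons hkT, List.drop_eq_getElem_cons hkF]
    simp only [List.zip_cons_cons, List.foldl_cons]
    exact ih (k + 1) (by omega) _

set_option maxRecDepth 40000 in
theorem pvRangeEq : PySem.List.pyRange 0 (PySem.Str.len pvText) 1
    = (List.range' 0 26).map (fun n : Nat => (n : Int)) := by decide

-- A's inner loop computes the pointwise chain map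
theorem pvInnerA_eq (font : String) (h26 : font.toList.length = pvText.toList.length)
    (name : String) :
    pvInnerA font name
      = String.ofList (name.toList.map
          (fun x => (pvText.toList.zip font.toList).foldl
            (fun y p => if y = p.1 then p.2 else y) x)) := by
  rw [pvInnerA, pvRangeEq, pvInnerRange font h26 26 0 rfl name]
  simp [pvZipRepl]

-- A unfolded to a map over the fonts
theorem pvAfold (name : String) :
    ∀ (fs : List String) (acc : List String),
      fs.foldl (fun result font => result ++ [pvInnerA font name]) acc
        = acc ++ fs.map (fun font => pvInnerA font name) := by
  intro fs
  induction fs with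
  | nil => intro acc; simp
  | cons f fs ih => intro acc; simp [ih]

-- re-zipping after a fst-only update
theorem pvZipMapFst {α β : Type} (g : α × β → α) :
    ∀ (xs : List α) (ys : List β),
      ((xs.zip ys).map g).zip ys = (xs.zip ys).map (fun p => (g p, p.2)) := by
  intro xs
  induction xs with
  | nil => intro ys; simp
  | cons x xs ih =>
    intro ys
    cases ys with
    | nil => simp
    | cons y ys => simp [ih]

-- zipping a map of a list with the list itself
theorem pvZipSelf {α β : Type} (g : α → β) :
    ∀ (l : List α), (l.map g).zip l = l.map (fun x => (g x, x)) := by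
  intro l
  induction l with
  | nil => simp
  | cons x l ih => simp [ih]

-- B's per-character choice is pvG
theorem pvBchar (f : String) (ch : Char) :
    (if PySem.Str.find pvText (String.ofList [ch]) = -1 then ch
     else match PySem.Str.pyGet? f (PySem.Str.find pvText (String.ofList [ch])) with
          | some c => c
          | none => ch) = pvG f.toList ch := by
  rw [pvG]
  have hfind : PySem.Str.find pvText (String.ofList [ch])
      = PySem.Chars.find pvText.toList [ch] := by
    rw [PySem.Str.find_eq, String.toList_ofList]
  by_cases h : PySem.Chars.find pvText.toList [ch] = -1
  · rw [if_pos (hfind ▸ h), if_pos h]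
  · have h0 : 0 ≤ PySem.Chars.find pvText.toList [ch] := by
      have := PySem.Chars.neg_one_le_find pvText.toList [ch]; omega
    rw [if_neg (hfind ▸ h), if_neg h, hfind,
        show PySem.Chars.find pvText.toList [ch]
          = ((PySem.Chars.find pvText.toList [ch]).toNat : Int) from (Int.toNat_of_nonneg h0).symm,
        PySem.Str.pyGet?_natCast, Int.toNat_natCast]

-- invariant of B's fold: each accumulator entry grows by the mapped characters
theorem pvBfold :
    ∀ (l : List Char) (acc : List (List Char)), acc.length = pvFonts.length →
      l.foldl pvBstep acc
        = (acc.zip pvFonts).map (fun pf => pf.1 ++ l.map (pvG pf.2.toList)) := by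
  intro l
  induction l with
  | nil =>
    intro acc hacc
    simp only [List.foldl_nil, List.map_nil, List.append_nil]
    exact (List.map_fst_zip (le_of_eq hacc)).symm
  | cons ch l ih =>
    intro acc hacc
    simp only [List.foldl_cons]
    have hstep : pvBstep acc ch
        = (acc.zip pvFonts).map (fun pf => pf.1 ++ [pvG pf.2.toList ch]) := by
      rw [pvBstep]
      exact List.map_congr_left (fun pf _ => by rw [pvBchar pf.2 ch])
    rw [hstep, ih _ (by simp [hacc]), pvZipMapFst, List.map_map]
    refine List.map_congr_left (fun pf _ => ?_)
    simp

-- B unfolded to a map over the fonts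
theorem pvBalt (name : String) :
    nick_generator_alt name
      = pvFonts.map (fun f => String.ofList (name.toList.map (pvG f.toList))) := by
  have hz : nick_generator_alt name
      = (name.toList.foldl pvBstep (pvFonts.map (fun _ => ([] : List Char)))).map String.ofList := by
    rfl
  rw [hz, pvBfold _ _ (by simp), pvZipSelf, List.map_map, List.map_map]
  exact List.map_congr_left (fun f _ => by simp)

-- ===== VERDICT (by name: the statement is the Claim_ definition above) =====
theorem nick_generator_spec : Claim_equal_nick_generator := by
  intro name _
  show nick_generator name = nick_generator_alt name
  rw [nick_generator, pvAfold, List.nil_append, pvBalt]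
  refine List.map_congr_left (fun f hf => ?_)
  obtain ⟨h26, hpw⟩ := pvFontsFacts f hf
  rw [pvInnerA_eq f h26 name]
  refine congrArg String.ofList (List.map_congr_left (fun x _ => ?_))
  rw [pvChainFind x _ hpw, pvFindG pvText.toList f.toList h26 x, pvG]
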